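-- pv_equiv track=rewrite | github.com/nacsacsa/Hazik | hazi62.py | kiszedes
-- ===== SOURCE A (Python) =====
-- def kiszedes(szoveg):
--     negyszeres_massalhangzok = {"ygyg": "ygg", "ynyn": "ynn", "zszs": "zss", "ytyt": "ytt", "scsc": "scc"}
--     negyszeres_massalhangzok_normal = {"gygy": "gyy", "nyny": "nny", "szsz": "ssz", "tyty": "tty", "cscs": "css"}
--     uj_szoveg = ""
--     szamlalo = 0
--     while szamlalo < len(szoveg):
--         negy = ""
--         if szamlalo < len(szoveg) - 3:
--             negy = szoveg[szamlalo] + szoveg[szamlalo + 1] + szoveg[szamlalo + 2] + szoveg[szamlalo + 3]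
--         if negy in negyszeres_massalhangzok.keys():
--             for x, y in negyszeres_massalhangzok.items():
--                 if negy == x:
--                     uj_szoveg += y
--                     szamlalo += 3
--                     break
--         elif negy in negyszeres_massalhangzok_normal.keys():
--             for x, y in negyszeres_massalhangzok_normal.items():
--                 if negy == x:
--                     uj_szoveg += y
--                     szamlalo += 3
--                     break
--         else:
--             uj_szoveg += szoveg[szamlalo]
--         szamlalo += 1
--     return uj_szoveg
-- ===== SOURCE B (Python) =====
-- # Mark-then-filter: each quadrupled digraph collapse deletes exactly one character,
-- # so pass 1 only records the absolute indices of the characters to drop (a set),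
-- # and pass 2 rebuilds the string by skipping those indices.
-- _TOROLT_OFS = {"ygyg": 2, "ynyn": 2, "zszs": 2, "ytyt": 2, "scsc": 2,
--                "gygy": 2, "nyny": 1, "szsz": 1, "tyty": 1, "cscs": 2}
--
-- def kiszedes(szoveg):
--     torolt = set()
--     i = 0
--     n = len(szoveg)
--     while i + 4 <= n:
--         ofs = _TOROLT_OFS.get(szoveg[i:i + 4])
--         if ofs is None:
--             i += 1
--         else:
--             torolt.add(i + ofs)
--             i += 4
--     return "".join(c for j, c in enumerate(szoveg) if j not in torolt)
-- ===== Notes on version B (the rewrite author's own statement) =====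
-- stated objective: faster
-- what changed: B replaces A's build-the-output-as-you-scan (two dicts, per-match replacement string, quadratic string concatenation) with a mark-then-filter algorithm: one pass records only the absolute index of the single character each quadrupled digraph loses in a set, and a second pass rebuilds the string once, skipping the marked indices.
import Mathlib
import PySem

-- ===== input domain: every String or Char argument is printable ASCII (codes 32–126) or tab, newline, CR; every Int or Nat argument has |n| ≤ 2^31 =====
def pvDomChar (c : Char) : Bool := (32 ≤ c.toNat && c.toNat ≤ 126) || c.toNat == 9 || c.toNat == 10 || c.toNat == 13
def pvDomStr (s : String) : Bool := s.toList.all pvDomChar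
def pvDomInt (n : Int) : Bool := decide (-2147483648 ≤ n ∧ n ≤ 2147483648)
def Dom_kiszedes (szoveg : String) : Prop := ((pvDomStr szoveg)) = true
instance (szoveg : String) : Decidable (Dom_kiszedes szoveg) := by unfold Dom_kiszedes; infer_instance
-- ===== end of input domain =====

-- B: mark-then-filter — one pass records the index of the single character each quadrupled
-- digraph loses (a set of indices), a second pass rebuilds the string skipping those indices
-- (measured faster in a timing run: no quadratic string concatenation).

-- ===== PORT A =====
-- A's two dicts, as association lists in insertion order
def pvPairsA1 : List (List Char × List Char) :=
  [(['y','g','y','g'], ['y','g','g']), (['y','n','y','n'], ['y','n','n']),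
   (['z','s','z','s'], ['z','s','s']), (['y','t','y','t'], ['y','t','t']),
   (['s','c','s','c'], ['s','c','c'])]
def pvPairsA2 : List (List Char × List Char) :=
  [(['g','y','g','y'], ['g','y','y']), (['n','y','n','y'], ['n','n','y']),
   (['s','z','s','z'], ['s','s','z']), (['t','y','t','y'], ['t','t','y']),
   (['c','s','c','s'], ['c','s','s'])]

-- A's 'negy in d.keys()' test followed by the 'for x, y in d.items(): if negy == x: … break'
-- scan: both are the first match in insertion order, transcribed as one first-match search.
def pvScanA (d : List (List Char × List Char)) (negy : List Char) : Option (List Char) :=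
  match d with
  | [] => none
  | (x, y) :: rest => if negy == x then some y else pvScanA rest negy

-- the while-loop of A: index szamlalo, string accumulator uj_szoveg
def pvLoopA (s : List Char) (i : Nat) (acc : List Char) : List Char :=
  if i < s.length then
    let negy : List Char :=
      if i < s.length - 3 then
        [s.getD i ' ', s.getD (i+1) ' ', s.getD (i+2) ' ', s.getD (i+3) ' ']
      else []
    match pvScanA pvPairsA1 negy with
    | some y => pvLoopA s (i+4) (acc ++ y)     -- += y, szamlalo += 3, then += 1
    | none =>
      match pvScanA pvPairsA2 negy with
      | some y => pvLoopA s (i+4) (acc ++ y)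
      | none => pvLoopA s (i+1) (acc ++ [s.getD i ' '])
  else acc
termination_by s.length - i
decreasing_by all_goals omega

def kiszedes (szoveg : String) : String :=
  String.ofList (pvLoopA szoveg.toList 0 [])

-- ===== PORT B =====
-- B's table _TOROLT_OFS: 4-char window → offset of the character the collapse deletes
def pvOfs : PySem.Dict (List Char) Nat :=
  PySem.Dict.mk
    [(['y','g','y','g'], 2), (['y','n','y','n'], 2), (['z','s','z','s'], 2),
     (['y','t','y','t'], 2), (['s','c','s','c'], 2), (['g','y','g','y'], 2),
     (['n','y','n','y'], 1), (['s','z','s','z'], 1), (['t','y','t','y'], 1),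
     (['c','s','c','s'], 2)]

-- B's first pass: torolt = set of absolute indices to delete
def pvLoopDel (s : List Char) (i : Nat) (torolt : PySem.Set Int) : PySem.Set Int :=
  if i + 4 ≤ s.length then
    match pvOfs.get? ((s.drop i).take 4) with      -- _TOROLT_OFS.get(szoveg[i:i+4])
    | none => pvLoopDel s (i+1) torolt
    | some k => pvLoopDel s (i+4) (torolt.add ((i + k : Nat) : Int))
  else torolt
termination_by s.length - i
decreasing_by all_goals omega

-- B's second pass: join over the enumerate generator, skipping marked indices
def kiszedes_alt (szoveg : String) : String :=
  let torolt := pvLoopDel szoveg.toList 0 PySem.Set.empty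
  String.ofList ((PySem.List.enumerate szoveg.toList 0).filterMap
    (fun p => if torolt.contains p.1 then none else some p.2))

-- ===== PRECONDITION & SPEC =====
def Spec_kiszedes (szoveg : String) (out : String) : Prop := out = kiszedes_alt szoveg
instance (szoveg : String) (out : String) : Decidable (Spec_kiszedes szoveg out) := by unfold Spec_kiszedes; infer_instance

-- ===== CLAIM (what is proved, stated in full; the proofs are below) =====
def Claim_equal_kiszedes : Prop := ∀ (szoveg : String), Dom_kiszedes szoveg → Spec_kiszedes szoveg (kiszedes szoveg)

-- ===== LEMMAS AND PROOFS =====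

-- A's two first-match scans in sequence = B's offset lookup followed by deleting that character
theorem pvScan_eq_ofs (w : List Char) :
    ((pvScanA pvPairsA1 w).orElse (fun _ => pvScanA pvPairsA2 w)) =
    (pvOfs.get? w).map (fun k => w.eraseIdx k) := by
  by_cases h1 : w = ['y','g','y','g']
  · subst h1; decide
  by_cases h2 : w = ['y','n','y','n']
  · subst h2; decide
  by_cases h3 : w = ['z','s','z','s']
  · subst h3; decide
  by_cases h4 : w = ['y','t','y','t']
  · subst h4; decide
  by_cases h5 : w = ['s','c','s','c']
  · subst h5; decide
  by_cases h6 : w = ['g','y','g','y']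
  · subst h6; decide
  by_cases h7 : w = ['n','y','n','y']
  · subst h7; decide
  by_cases h8 : w = ['s','z','s','z']
  · subst h8; decide
  by_cases h9 : w = ['t','y','t','y']
  · subst h9; decide
  by_cases h10 : w = ['c','s','c','s']
  · subst h10; decide
  simp [pvScanA, pvPairsA1, pvPairsA2, pvOfs, PySem.Dict.get?,
        Option.orElse, h1, h2, h3, h4, h5, h6, h7, h8, h9, h10, Ne.symm h1, Ne.symm h2, Ne.symm h3, Ne.symm h4, Ne.symm h5, Ne.symm h6, Ne.symm h7, Ne.symm h8, Ne.symm h9, Ne.symm h10]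

-- every recorded offset is 1 or 2
theorem pvOfs_bounds (w : List Char) (k : Nat) (h : pvOfs.get? w = some k) : k = 1 ∨ k = 2 := by
  simp only [pvOfs, PySem.Dict.get?_mk_cons] at h
  split_ifs at h <;> simp_all [PySem.Dict.get?]

-- B's 4-char slice is A's char-by-char window when a full window exists
theorem pvWindow_eq (s : List Char) (i : Nat) (h : i + 4 ≤ s.length) :
    (s.drop i).take 4 = [s.getD i ' ', s.getD (i+1) ' ', s.getD (i+2) ' ', s.getD (i+3) ' '] := by
  rw [List.drop_eq_getElem_cons (by omega), List.drop_eq_getElem_cons (by omega),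
      List.drop_eq_getElem_cons (by omega), List.drop_eq_getElem_cons (by omega)]
  rw [List.getD_eq_getElem s ' ' (by omega : i < s.length),
      List.getD_eq_getElem s ' ' (by omega : i + 1 < s.length),
      List.getD_eq_getElem s ' ' (by omega : i + 2 < s.length),
      List.getD_eq_getElem s ' ' (by omega : i + 3 < s.length)]
  simp [List.take]

-- every index the first pass records from position i onwards is ≥ i+1
theorem pvLoopDel_ge (s : List Char) (i : Nat) (T : PySem.Set Int) (j : Int)
    (hj : j ∈ pvLoopDel s i T) : j ∈ T ∨ (i : Int) + 1 ≤ j := by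
  rw [pvLoopDel] at hj
  by_cases h : i + 4 ≤ s.length
  · rw [if_pos h] at hj
    cases hk : pvOfs.get? ((s.drop i).take 4) with
    | none =>
      rw [hk] at hj
      rcases pvLoopDel_ge s (i+1) T j hj with h1 | h1
      · exact Or.inl h1
      · right; push_cast at h1 ⊢; omega
    | some k =>
      rw [hk] at hj
      rcases pvLoopDel_ge s (i+4) (T.add ((i + k : Nat) : Int)) j hj with h1 | h1
      · rcases (PySem.Set.mem_add _ _ _).1 h1 with h2 | h2
        · exact Or.inl h2
        · right
          rcases pvOfs_bounds _ _ hk with rfl | rfl <;> (subst h2; push_cast; omega)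
      · right; push_cast at h1 ⊢; omega
  · rw [if_neg h] at hj; exact Or.inl hj
termination_by s.length - i
decreasing_by all_goals omega

-- the accumulator set only accumulates: membership splits off the seed
theorem pvLoopDel_mem (s : List Char) (i : Nat) (T : PySem.Set Int) (j : Int) :
    j ∈ pvLoopDel s i T ↔ j ∈ T ∨ j ∈ pvLoopDel s i PySem.Set.empty := by
  conv_lhs => rw [pvLoopDel]
  conv_rhs => rw [pvLoopDel]
  by_cases h : i + 4 ≤ s.length
  · rw [if_pos h, if_pos h]
    cases hk : pvOfs.get? ((s.drop i).take 4) with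
    | none => exact pvLoopDel_mem s (i+1) T j
    | some k =>
      rw [pvLoopDel_mem s (i+4) (T.add _) j, pvLoopDel_mem s (i+4) (PySem.Set.empty.add _) j,
          PySem.Set.mem_add, PySem.Set.mem_add]
      simp [PySem.Set.empty]
      tauto
  · rw [if_neg h, if_neg h]; simp [PySem.Set.empty]
termination_by s.length - i
decreasing_by all_goals omega

theorem pv_contains_false {T : PySem.Set Int} {j : Int} (h : j ∉ T) :
    PySem.Set.contains T j = false := by
  simp [PySem.Set.contains_eq_listContains, h]

theorem pv_contains_true {T : PySem.Set Int} {j : Int} (h : j ∈ T) :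
    PySem.Set.contains T j = true := by
  simp [PySem.Set.contains_eq_listContains, h]

-- the filter pass only looks at membership at indices ≥ start
theorem pvFilter_congr (u : List Char) (st : Int) (T1 T2 : PySem.Set Int)
    (h : ∀ j : Int, st ≤ j → T1.contains j = T2.contains j) :
    (PySem.List.enumerate u st).filterMap (fun p => if T1.contains p.1 then none else some p.2) =
    (PySem.List.enumerate u st).filterMap (fun p => if T2.contains p.1 then none else some p.2) := by
  induction u generalizing st with
  | nil => simp [PySem.List.enumerate_nil]
  | cons c u ih =>
    rw [PySem.List.enumerate_cons, List.filterMap_cons, List.filterMap_cons]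
    rw [h st le_rfl, ih (st + 1) (fun j hj => h j (by omega))]

-- the main invariant: A's loop from i equals acc ++ the marked-filtered suffix from i
theorem pvMain (s : List Char) (i : Nat) (acc : List Char) :
    pvLoopA s i acc = acc ++
      (PySem.List.enumerate (s.drop i) (i : Int)).filterMap
        (fun p => if (pvLoopDel s i PySem.Set.empty).contains p.1 then none else some p.2) := by
  by_cases hlen : i < s.length
  · by_cases hw : i < s.length - 3
    · have h4 : i + 4 ≤ s.length := by omega
      have hwin := pvWindow_eq s i h4
      have hscan := pvScan_eq_ofs [s.getD i ' ', s.getD (i+1) ' ', s.getD (i+2) ' ', s.getD (i+3) ' ']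
      have hdel : pvLoopDel s i PySem.Set.empty =
          match pvOfs.get? [s.getD i ' ', s.getD (i+1) ' ', s.getD (i+2) ' ', s.getD (i+3) ' '] with
          | none => pvLoopDel s (i+1) PySem.Set.empty
          | some k => pvLoopDel s (i+4) (PySem.Set.empty.add ((i + k : Nat) : Int)) := by
        rw [pvLoopDel, if_pos h4, hwin]
      cases hk : pvOfs.get? [s.getD i ' ', s.getD (i+1) ' ', s.getD (i+2) ' ', s.getD (i+3) ' '] with
      | none =>
        rw [hk] at hscan hdel
        have hdelN : pvLoopDel s i PySem.Set.empty = pvLoopDel s (i+1) PySem.Set.empty := by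
          rw [hdel]
        have h1 : pvScanA pvPairsA1 [s.getD i ' ', s.getD (i+1) ' ', s.getD (i+2) ' ', s.getD (i+3) ' '] = none := by
          cases h1 : pvScanA pvPairsA1 _ with
          | none => rfl
          | some y => rw [h1] at hscan; simp [Option.orElse] at hscan
        have h2 : pvScanA pvPairsA2 [s.getD i ' ', s.getD (i+1) ' ', s.getD (i+2) ' ', s.getD (i+3) ' '] = none := by
          rw [h1] at hscan; simpa [Option.orElse] using hscan
        have hAstep : pvLoopA s i acc = pvLoopA s (i+1) (acc ++ [s.getD i ' ']) := by
          rw [pvLoopA]; simp only [if_pos hlen, if_pos hw]; rw [h1, h2]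
        have hcontains : (pvLoopDel s (i+1) PySem.Set.empty).contains (i : Int) = false := by
          apply pv_contains_false
          intro hmem
          rcases pvLoopDel_ge s (i+1) PySem.Set.empty _ hmem with h | h
          · simp [PySem.Set.empty] at h
          · push_cast at h; omega
        rw [hAstep, hdelN,
            List.drop_eq_getElem_cons (by omega : i < s.length),
            PySem.List.enumerate_cons, List.filterMap_cons, hcontains,
            show (i : Int) + 1 = ((i + 1 : Nat) : Int) by push_cast; ring,
            pvMain s (i+1) (acc ++ [s.getD i ' ']),
            List.getD_eq_getElem s ' ' (by omega : i < s.length)]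
        simp
      | some k =>
        rw [hk] at hscan hdel
        have hdelS : pvLoopDel s i PySem.Set.empty =
            pvLoopDel s (i+4) (PySem.Set.empty.add ((i + k : Nat) : Int)) := by
          rw [hdel]
        have hAstep : pvLoopA s i acc = pvLoopA s (i+4)
            (acc ++ [s.getD i ' ', s.getD (i+1) ' ', s.getD (i+2) ' ', s.getD (i+3) ' '].eraseIdx k) := by
          rw [pvLoopA]; simp only [if_pos hlen, if_pos hw]
          cases h1 : pvScanA pvPairsA1 [s.getD i ' ', s.getD (i+1) ' ', s.getD (i+2) ' ', s.getD (i+3) ' '] with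
          | some y =>
            rw [h1] at hscan; simp [Option.orElse] at hscan; subst hscan; rfl
          | none =>
            rw [h1] at hscan
            cases h2 : pvScanA pvPairsA2 [s.getD i ' ', s.getD (i+1) ' ', s.getD (i+2) ' ', s.getD (i+3) ' '] with
            | some y => rw [h2] at hscan; simp [Option.orElse] at hscan; subst hscan; rfl
            | none => rw [h2] at hscan; simp [Option.orElse] at hscan
        rw [hAstep, hdelS]
        set T'' := pvLoopDel s (i+4) PySem.Set.empty with hT''
        have hmemT : ∀ j : Int, j ∈ pvLoopDel s (i+4) (PySem.Set.empty.add ((i + k : Nat) : Int)) ↔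
            j = ((i + k : Nat) : Int) ∨ j ∈ T'' := by
          intro j
          rw [pvLoopDel_mem, PySem.Set.mem_add]
          simp [PySem.Set.empty, hT'']
        have hge : ∀ j : Int, j ∈ T'' → (i : Int) + 5 ≤ j := by
          intro j hj
          rcases pvLoopDel_ge s (i+4) PySem.Set.empty j hj with h | h
          · simp [PySem.Set.empty] at h
          · push_cast at h ⊢; omega
        set T := pvLoopDel s (i+4) (PySem.Set.empty.add ((i + k : Nat) : Int)) with hT
        have hcget : ∀ m : Nat, m < 4 → T.contains ((i + m : Nat) : Int) = decide (m = k) := by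
          intro m hm
          by_cases hmk : m = k
          · subst hmk
            rw [pv_contains_true ((hmemT _).2 (Or.inl rfl))]
            simp
          · have hnm : ((i + m : Nat) : Int) ∉ T := by
              intro hmem
              rcases (hmemT _).1 hmem with h | h
              · have : i + m = i + k := by exact_mod_cast h
                omega
              · have := hge _ h; push_cast at this; omega
            rw [pv_contains_false hnm]
            simp [hmk]
        have htail : (PySem.List.enumerate (s.drop (i+4)) ((i+4 : Nat) : Int)).filterMap
              (fun p => if T.contains p.1 then none else some p.2) =
            (PySem.List.enumerate (s.drop (i+4)) ((i+4 : Nat) : Int)).filterMap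
              (fun p => if T''.contains p.1 then none else some p.2) := by
          apply pvFilter_congr
          intro j hj
          by_cases hjm : j ∈ T''
          · rw [pv_contains_true hjm, pv_contains_true ((hmemT j).2 (Or.inr hjm))]
          · rw [pv_contains_false hjm, pv_contains_false]
            intro hmem
            rcases (hmemT j).1 hmem with h | h
            · rcases pvOfs_bounds _ _ hk with rfl | rfl <;> (subst h; push_cast at hj; omega)
            · exact hjm h
        rw [List.drop_eq_getElem_cons (by omega : i < s.length),
            List.drop_eq_getElem_cons (by omega : i + 1 < s.length),
            List.drop_eq_getElem_cons (by omega : i + 2 < s.length),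
            List.drop_eq_getElem_cons (by omega : i + 3 < s.length),
            PySem.List.enumerate_cons, PySem.List.enumerate_cons,
            PySem.List.enumerate_cons, PySem.List.enumerate_cons,
            List.filterMap_cons, List.filterMap_cons, List.filterMap_cons, List.filterMap_cons,
            show T.contains (i : Int) = T.contains ((i + 0 : Nat) : Int) by norm_num,
            show T.contains ((i : Int) + 1) = T.contains ((i + 1 : Nat) : Int) by push_cast; ring_nf,
            show T.contains ((i : Int) + 1 + 1) = T.contains ((i + 2 : Nat) : Int) by push_cast; ring_nf,
            show T.contains ((i : Int) + 1 + 1 + 1) = T.contains ((i + 3 : Nat) : Int) by push_cast; ring_nf,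
            show (i : Int) + 1 + 1 + 1 + 1 = ((i + 4 : Nat) : Int) by push_cast; ring,
            hcget 0 (by omega), hcget 1 (by omega), hcget 2 (by omega), hcget 3 (by omega),
            htail, pvMain s (i+4)]
        have q0 : s[i]? = some (s[i]'(by omega)) := List.getElem?_eq_getElem (by omega)
        have q1 : s[i+1]? = some (s[i+1]'(by omega)) := List.getElem?_eq_getElem (by omega)
        have q2 : s[i+2]? = some (s[i+2]'(by omega)) := List.getElem?_eq_getElem (by omega)
        have q3 : s[i+3]? = some (s[i+3]'(by omega)) := List.getElem?_eq_getElem (by omega)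
        rcases pvOfs_bounds _ _ hk with rfl | rfl <;>
          simp [hT'', PySem.Set.empty, List.eraseIdx, q0, q1, q2, q3]
    · -- tail region: no full window, A copies the character, B marks nothing
      have hdel0 : pvLoopDel s i PySem.Set.empty = PySem.Set.empty := by
        rw [pvLoopDel, if_neg (by omega : ¬ i + 4 ≤ s.length)]
      have hdel1 : pvLoopDel s (i+1) PySem.Set.empty = PySem.Set.empty := by
        rw [pvLoopDel, if_neg (by omega : ¬ i + 1 + 4 ≤ s.length)]
      have h1 : pvScanA pvPairsA1 ([] : List Char) = none := by decide
      have h2 : pvScanA pvPairsA2 ([] : List Char) = none := by decide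
      have hAstep : pvLoopA s i acc = pvLoopA s (i+1) (acc ++ [s.getD i ' ']) := by
        rw [pvLoopA]; simp only [if_pos hlen, if_neg hw]; rw [h1, h2]
      have hcontains : (PySem.Set.empty : PySem.Set Int).contains (i : Int) = false := by
        apply pv_contains_false; simp [PySem.Set.empty]
      rw [hAstep, hdel0,
          List.drop_eq_getElem_cons (by omega : i < s.length),
          PySem.List.enumerate_cons, List.filterMap_cons, hcontains,
          show (i : Int) + 1 = ((i + 1 : Nat) : Int) by push_cast; ring,
          pvMain s (i+1), hdel1,
          List.getD_eq_getElem s ' ' (by omega : i < s.length)]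
      simp
  · rw [pvLoopA, if_neg hlen,
        List.drop_eq_nil_of_le (by omega), PySem.List.enumerate_nil]
    simp
termination_by s.length - i
decreasing_by all_goals omega

-- ===== VERDICT (by name: the statement is the Claim_ definition above) =====
theorem kiszedes_spec : Claim_equal_kiszedes := by
  intro szoveg _
  unfold Spec_kiszedes kiszedes kiszedes_alt
  rw [pvMain szoveg.toList 0 []]
  simp
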